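-- pv_equiv track=rewrite | github.com/MONROYJ04/7E_Sistemas-Expertos_22310267 | Parcial1/Practica1/96_Encadenamiento_Hacia_Delante_y_Atras.py | encadenamiento_hacia_adelante
-- ===== SOURCE A (Python) =====
-- def encadenamiento_hacia_adelante(hechos, reglas):
--     """
--     Realiza el encadenamiento hacia adelante para derivar nuevos hechos.
--     :param hechos: Lista de hechos iniciales.
--     :param reglas: Lista de reglas (condiciones, conclusión).
--     :return: Lista de todos los hechos derivados.
--     """
--     hechos_derivados = set(hechos)  # Usamos un conjunto para evitar duplicados.
--     cambio = True  # Variable para rastrear si se derivaron nuevos hechos.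
--
--     while cambio:
--         cambio = False
--         for condiciones, conclusion in reglas:
--             # Verificamos si todas las condiciones de la regla son verdaderas.
--             if all(condicion in hechos_derivados for condicion in condiciones):
--                 if conclusion not in hechos_derivados:
--                     hechos_derivados.add(conclusion)  # Agregamos la conclusión como un nuevo hecho.
--                     cambio = True  # Indicamos que hubo un cambio.
--     return list(hechos_derivados)
-- ===== SOURCE B (Python) =====
-- def encadenamiento_hacia_adelante(hechos, reglas):
--     """
--     Counter variant: an inverted index (condition -> rules) plus a per-rule
--     counter of unmet distinct conditions replaces the inner all(...) scan.
--     """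
--     derivados = set(hechos)
--     index = {}   # condition -> list of indices of rules with that condition initially unmet
--     unmet = []   # unmet[i] = number of distinct conditions of rule i not yet derived
--     for i, (condiciones, _conclusion) in enumerate(reglas):
--         faltan = set(c for c in condiciones if c not in derivados)
--         unmet.append(len(faltan))
--         for c in faltan:
--             index.setdefault(c, []).append(i)
--     cambio = True
--     while cambio:
--         cambio = False
--         for i, (_condiciones, conclusion) in enumerate(reglas):
--             if unmet[i] == 0 and conclusion not in derivados:
--                 derivados.add(conclusion)
--                 for j in index.get(conclusion, []):
--                     unmet[j] -= 1
--                 cambio = True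
--     return list(derivados)
-- ===== Notes on version B (the rewrite author's own statement) =====
-- stated objective: alternative
-- what changed: B builds an inverted index (condition -> rules) once and keeps a per-rule counter of unmet distinct conditions, decremented as each new fact is derived, so a rule's readiness test in a sweep is an O(1) counter check instead of re-scanning its condition list against the fact set; on the generated random inputs this is not measurably faster (A's all() short-circuits early), so no speed is claimed.
import Mathlib
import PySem

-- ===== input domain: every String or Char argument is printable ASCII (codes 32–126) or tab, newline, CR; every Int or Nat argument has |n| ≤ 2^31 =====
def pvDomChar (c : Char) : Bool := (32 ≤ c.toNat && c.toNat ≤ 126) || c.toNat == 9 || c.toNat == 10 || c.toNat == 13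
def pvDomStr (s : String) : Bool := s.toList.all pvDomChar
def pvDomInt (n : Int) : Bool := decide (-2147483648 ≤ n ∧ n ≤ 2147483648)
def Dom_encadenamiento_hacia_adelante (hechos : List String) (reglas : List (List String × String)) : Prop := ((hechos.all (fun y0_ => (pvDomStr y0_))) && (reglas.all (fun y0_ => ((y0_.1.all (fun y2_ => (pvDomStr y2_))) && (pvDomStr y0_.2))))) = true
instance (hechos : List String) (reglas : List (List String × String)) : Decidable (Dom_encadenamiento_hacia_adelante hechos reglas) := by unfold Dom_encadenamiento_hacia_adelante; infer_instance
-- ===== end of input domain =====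

-- B replaces A's inner all(...) scan by an inverted index (condition → rules) with per-rule
-- unmet-distinct-condition counters, decremented as facts are derived (objective: alternative).
-- Both programs return list(set(...)); the ports realise that set in insertion order
-- (Python's hash iteration order is not modelled; outputs are compared as sets).

-- ===== PORT A =====
-- one sweep of the `for condiciones, conclusion in reglas` body over the fact set, with the `cambio` flag
def pvPassA (reglas : List (List String × String)) (S : PySem.Set String) :
    PySem.Set String × Bool :=
  reglas.foldl (fun (st : PySem.Set String × Bool) r =>
    if r.1.all (fun c => PySem.Set.contains st.1 c) then
      if PySem.Set.contains st.1 r.2 then st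
      else (PySem.Set.add st.1 r.2, true)
    else st) (S, false)

-- the `while cambio` loop; every iteration that sets `cambio` adds at least one of the
-- ≤ reglas.length conclusions to the set, so fuel reglas.length + 1 always reaches the
-- unchanged sweep Python exits on
def pvLoopA (reglas : List (List String × String)) : Nat → PySem.Set String → PySem.Set String
  | 0, S => S
  | fuel + 1, S =>
    let p := pvPassA reglas S
    if p.2 then pvLoopA reglas fuel p.1 else p.1

def encadenamiento_hacia_adelante (hechos : List String) (reglas : List (List String × String)) : List String :=
  pvLoopA reglas (reglas.length + 1) (PySem.Set.ofList hechos)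

-- ===== PORT B =====
-- building `index` (condition → rule indices) and `unmet`; Python's enumerate counter is the
-- Nat in the fold state; the set `faltan` is realised in first-occurrence order (its iteration
-- order only decides dict key order, which get() never observes)
def pvInitB (S0 : PySem.Set String) (reglas : List (List String × String)) :
    PySem.Dict String (List Nat) × List Int :=
  (reglas.foldl (fun (st : Nat × PySem.Dict String (List Nat) × List Int) r =>
      let faltan := PySem.List.dedup (r.1.filter (fun c => !(PySem.Set.contains S0 c)))
      (st.1 + 1,
       faltan.foldl (fun d c => d.modify c [] (fun l => l ++ [st.1])) st.2.1,
       st.2.2 ++ [(faltan.length : Int)])) (0, PySem.Dict.empty, [])).2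

-- one sweep of B's inner for-loop: a counter test per rule, decrements via the index on a fire
-- (unmet[j] -= 1 is a set at j; every j the index holds is in range)
def pvPassB (index : PySem.Dict String (List Nat)) (reglas : List (List String × String))
    (S : PySem.Set String) (unmet : List Int) :
    PySem.Set String × List Int × Bool :=
  (reglas.foldl (fun (st : Nat × PySem.Set String × List Int × Bool) r =>
      if st.2.2.1.getD st.1 0 == 0 && !(PySem.Set.contains st.2.1 r.2) then
        (st.1 + 1,
         PySem.Set.add st.2.1 r.2,
         (index.getD r.2 []).foldl (fun u j => u.set j (u.getD j 0 - 1)) st.2.2.1,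
         true)
      else (st.1 + 1, st.2.1, st.2.2.1, st.2.2.2)) (0, S, unmet, false)).2

-- B's `while cambio` loop, same fuel bound as A's for the same reason
def pvLoopB (reglas : List (List String × String)) (index : PySem.Dict String (List Nat)) :
    Nat → PySem.Set String → List Int → PySem.Set String
  | 0, S, _ => S
  | fuel + 1, S, unmet =>
    let p := pvPassB index reglas S unmet
    if p.2.2 then pvLoopB reglas index fuel p.1 p.2.1 else p.1

def encadenamiento_hacia_adelante_alt (hechos : List String) (reglas : List (List String × String)) : List String :=
  let S0 := PySem.Set.ofList hechos
  let iu := pvInitB S0 reglas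
  pvLoopB reglas iu.1 (reglas.length + 1) S0 iu.2

-- ===== PRECONDITION & SPEC =====
def Spec_encadenamiento_hacia_adelante (hechos : List String) (reglas : List (List String × String)) (out : List String) : Prop := out = encadenamiento_hacia_adelante_alt hechos reglas
instance (hechos : List String) (reglas : List (List String × String)) (out : List String) : Decidable (Spec_encadenamiento_hacia_adelante hechos reglas out) := by unfold Spec_encadenamiento_hacia_adelante; infer_instance

-- ===== CLAIM (what is proved, stated in full; the proofs are below) =====
def Claim_equal_encadenamiento_hacia_adelante : Prop := ∀ (hechos : List String) (reglas : List (List String × String)), Dom_encadenamiento_hacia_adelante hechos reglas → Spec_encadenamiento_hacia_adelante hechos reglas (encadenamiento_hacia_adelante hechos reglas)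

-- ===== LEMMAS AND PROOFS =====

-- the distinct conditions of rule `r` that the initial facts do not satisfy
def pvFaltan (S0 : PySem.Set String) (r : List String × String) : List String :=
  PySem.List.dedup (r.1.filter (fun c => !(PySem.Set.contains S0 c)))

-- number of distinct conditions not in the current fact set
def pvCnt (S : PySem.Set String) (conds : List String) : Nat :=
  ((PySem.List.dedup conds).filter (fun c => !(PySem.Set.contains S c))).length

-- the counter invariant tying B's state to the current fact set
def pvInv (reglas : List (List String × String)) (S : PySem.Set String) (unmet : List Int) : Prop :=
  unmet.length = reglas.length ∧
  ∀ i, i < reglas.length → unmet.getD i 0 = (pvCnt S (reglas.getD i ([], "")).1 : Int)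

-- dedup commutes with filter (first occurrences survive filtering): Set.add commutes with filter
theorem pv_filter_add (p : String → Bool) (acc : PySem.Set String) (x : String) :
    List.filter p (PySem.Set.add acc x)
      = if p x then PySem.Set.add (List.filter p acc) x else List.filter p acc := by
  by_cases hp : p x = true
  · simp only [hp, if_true, PySem.Set.add, PySem.Set.contains]
    by_cases hx : x ∈ acc
    · simp [hx, List.mem_filter, hp]
    · simp [hx, List.mem_filter, List.filter_append, hp]
  · simp only [Bool.not_eq_true] at hp
    simp only [hp, Bool.false_eq_true, if_false, PySem.Set.add, PySem.Set.contains]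
    by_cases hx : x ∈ acc
    · simp [hx]
    · simp [hx, List.filter_append, hp]

theorem pv_filter_foldl_add (p : String → Bool) (xs : List String) :
    ∀ acc : PySem.Set String,
      List.filter p (xs.foldl PySem.Set.add acc)
        = (xs.filter p).foldl PySem.Set.add (acc.filter p) := by
  induction xs with
  | nil => intro acc; simp
  | cons x xs ih =>
    intro acc
    by_cases hp : p x = true
    · simp only [List.foldl_cons, List.filter_cons, hp, if_true, List.foldl_cons]
      rw [ih, pv_filter_add, hp, if_pos rfl]
    · simp only [Bool.not_eq_true] at hp
      simp only [List.foldl_cons, List.filter_cons, hp]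
      rw [ih, pv_filter_add, hp]
      simp

theorem pv_dedup_filter (p : String → Bool) (xs : List String) :
    PySem.List.dedup (xs.filter p) = (PySem.List.dedup xs).filter p := by
  show PySem.List.dedup (xs.filter p) = List.filter p (PySem.List.dedup xs)
  rw [PySem.List.dedup_eq_ofList, PySem.List.dedup_eq_ofList, PySem.Set.ofList_eq_foldl,
      PySem.Set.ofList_eq_foldl, pv_filter_foldl_add]
  rfl

theorem pv_cnt_eq_zero_iff (S : PySem.Set String) (conds : List String) :
    pvCnt S conds = 0 ↔ conds.all (fun c => PySem.Set.contains S c) = true := by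
  unfold pvCnt
  rw [List.length_eq_zero_iff, List.filter_eq_nil_iff, List.all_eq_true]
  constructor
  · intro h c hc
    have := h c ((PySem.List.mem_dedup conds c).2 hc)
    simpa using this
  · intro h c hc
    have := h c ((PySem.List.mem_dedup conds c).1 hc)
    simpa using this

-- counting after one new fact x ∉ S is added
theorem pv_cnt_add (S : PySem.Set String) (conds : List String) (x : String) (hx : x ∉ S) :
    pvCnt (PySem.Set.add S x) conds
      = pvCnt S conds - (if x ∈ conds then 1 else 0) := by
  unfold pvCnt
  have hpt : ∀ c, (!(PySem.Set.contains (PySem.Set.add S x) c))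
      = ((!(PySem.Set.contains S c)) && !(c == x)) := by
    intro c
    by_cases h1 : c ∈ S <;> by_cases h2 : c = x <;>
      simp [PySem.Set.contains, PySem.Set.mem_add, h1, h2]
  have h1 : (PySem.List.dedup conds).filter (fun c => !(PySem.Set.contains (PySem.Set.add S x) c))
      = ((PySem.List.dedup conds).filter (fun c => !(PySem.Set.contains S c))).filter
          (fun c => !(c == x)) := by
    rw [List.filter_filter]
    exact List.filter_congr (fun c _ => by rw [hpt c, Bool.and_comm])
  rw [h1]
  have hnd : ((PySem.List.dedup conds).filter (fun c => !(PySem.Set.contains S c))).Nodup :=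
    (PySem.List.nodup_dedup conds).filter _
  have hmem : x ∈ (PySem.List.dedup conds).filter (fun c => !(PySem.Set.contains S c))
      ↔ x ∈ conds := by
    simp [List.mem_filter, PySem.Set.contains, hx]
  generalize (PySem.List.dedup conds).filter (fun c => !(PySem.Set.contains S c)) = L at hnd hmem
  by_cases hxc : x ∈ conds
  · rw [if_pos hxc]
    have hxL : x ∈ L := hmem.2 hxc
    have : L.filter (fun c => !(c == x)) = L.erase x := by
      rw [List.Nodup.erase_eq_filter hnd]
      exact List.filter_congr (fun c _ => by simp [bne])
    rw [this, List.length_erase_of_mem hxL]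
  · rw [if_neg hxc]
    have : L.filter (fun c => !(c == x)) = L := by
      apply List.filter_eq_self.2
      intro c hc
      have : c ≠ x := by rintro rfl; exact hxc (hmem.1 hc)
      simp [this]
    rw [this]; omega

theorem pv_cnt_pos (S : PySem.Set String) (conds : List String) (x : String)
    (hc : x ∈ conds) (hx : x ∉ S) : 1 ≤ pvCnt S conds := by
  have : x ∈ (PySem.List.dedup conds).filter (fun c => !(PySem.Set.contains S c)) := by
    simp [List.mem_filter, PySem.Set.contains, hc, hx]
  unfold pvCnt
  exact List.length_pos_of_mem this

-- folding `modify c [] (· ++ [k])` over a nodup list appends k exactly at its members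
theorem pv_modify_fold (L : List String) (hL : L.Nodup) (d : PySem.Dict String (List Nat))
    (k : Nat) (c : String) :
    (L.foldl (fun d c => d.modify c [] (fun l => l ++ [k])) d).getD c []
      = if c ∈ L then d.getD c [] ++ [k] else d.getD c [] := by
  induction L generalizing d with
  | nil => simp
  | cons a L ih =>
    have hnd := (List.nodup_cons.1 hL)
    rw [List.foldl_cons, ih hnd.2]
    by_cases hc : c ∈ L
    · have hca : c ≠ a := by rintro rfl; exact hnd.1 hc
      rw [if_pos hc, if_pos (List.mem_cons_of_mem a hc),
          PySem.Dict.getD_modify, if_neg hca]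
    · rw [if_neg hc]
      by_cases hca : c = a
      · subst hca
        rw [if_pos (List.mem_cons_self), PySem.Dict.getD_modify, if_pos rfl]
      · rw [PySem.Dict.getD_modify, if_neg hca, if_neg (by simp [hca, hc])]

-- decrementing along a nodup in-range index list is a pointwise update
theorem pv_dec_fold (js : List Nat) (hnd : js.Nodup) (u : List Int)
    (hin : ∀ j ∈ js, j < u.length) (i : Nat) :
    ((js.foldl (fun u j => u.set j (u.getD j 0 - 1)) u).getD i 0
        = u.getD i 0 - (if i ∈ js then 1 else 0)) ∧
    (js.foldl (fun u j => u.set j (u.getD j 0 - 1)) u).length = u.length := by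
  induction js generalizing u with
  | nil => simp
  | cons j js ih =>
    have hnd' := List.nodup_cons.1 hnd
    have hj : j < u.length := hin j List.mem_cons_self
    have hlen : (u.set j (u.getD j 0 - 1)).length = u.length := by simp
    have hin' : ∀ m ∈ js, m < (u.set j (u.getD j 0 - 1)).length := by
      intro m hm; rw [hlen]; exact hin m (List.mem_cons_of_mem j hm)
    obtain ⟨ihg, ihl⟩ := ih hnd'.2 (u.set j (u.getD j 0 - 1)) hin'
    refine ⟨?_, by rw [List.foldl_cons, ihl, hlen]⟩
    rw [List.foldl_cons, ihg]
    by_cases hij : i = j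
    · subst hij
      rw [if_neg hnd'.1, if_pos List.mem_cons_self]
      rw [List.getD_eq_getElem?_getD, List.getElem?_set_self (by omega),
          List.getD_eq_getElem?_getD, List.getElem?_eq_getElem hj]
      simp
    · rw [List.getD_eq_getElem?_getD, List.getElem?_set_ne (by omega), ← List.getD_eq_getElem?_getD]
      by_cases him : i ∈ js
      · rw [if_pos him, if_pos (List.mem_cons_of_mem j him)]
      · rw [if_neg him, if_neg (by simp [hij, him])]

-- characterisation of pvInitB's fold (counter k, dict d, list u generalized)
theorem pv_init_fold (S0 : PySem.Set String) (R : List (List String × String))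
    (rs : List (List String × String)) :
    ∀ (k : Nat) (d : PySem.Dict String (List Nat)) (u : List Int), rs = R.drop k →
    ((rs.foldl (fun (st : Nat × PySem.Dict String (List Nat) × List Int) r =>
        let faltan := PySem.List.dedup (r.1.filter (fun c => !(PySem.Set.contains S0 c)))
        (st.1 + 1,
         faltan.foldl (fun d c => d.modify c [] (fun l => l ++ [st.1])) st.2.1,
         st.2.2 ++ [(faltan.length : Int)])) (k, d, u)).2.2
       = u ++ rs.map (fun r => ((pvFaltan S0 r).length : Int))) ∧
    ∀ c, ((rs.foldl (fun (st : Nat × PySem.Dict String (List Nat) × List Int) r =>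
        let faltan := PySem.List.dedup (r.1.filter (fun c => !(PySem.Set.contains S0 c)))
        (st.1 + 1,
         faltan.foldl (fun d c => d.modify c [] (fun l => l ++ [st.1])) st.2.1,
         st.2.2 ++ [(faltan.length : Int)])) (k, d, u)).2.1).getD c []
       = d.getD c [] ++ (List.range' k rs.length).filter
           (fun j => decide (c ∈ pvFaltan S0 (R.getD j ([], "")))) := by
  induction rs with
  | nil => intro k d u _; simp
  | cons r rs ih =>
    intro k d u hdrop
    have hRk : R.getD k ([], "") = r := by
      rw [List.getD_eq_getElem?_getD]
      have : R[k]? = (R.drop k)[0]? := by simp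
      rw [this, ← hdrop]
      rfl
    have hdrop' : rs = R.drop (k + 1) := by
      have : R.drop (k+1) = (R.drop k).drop 1 := by rw [List.drop_drop]
      rw [this, ← hdrop]
      rfl
    obtain ⟨ih1, ih2⟩ := ih (k+1)
      ((PySem.List.dedup (r.1.filter (fun c => !(PySem.Set.contains S0 c)))).foldl
        (fun d c => d.modify c [] (fun l => l ++ [k])) d)
      (u ++ [((PySem.List.dedup (r.1.filter (fun c => !(PySem.Set.contains S0 c)))).length : Int)])
      hdrop'
    constructor
    · rw [List.foldl_cons, ih1]
      simp [pvFaltan]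
    · intro c
      rw [List.foldl_cons, ih2 c]
      rw [pv_modify_fold _ (PySem.List.nodup_dedup _) d k c]
      rw [List.length_cons, List.range'_succ, List.filter_cons]
      by_cases hc : c ∈ pvFaltan S0 r
      · rw [if_pos (by simpa [pvFaltan] using hc), if_pos (by rw [hRk]; exact decide_eq_true hc)]
        simp
      · rw [if_neg (by simpa [pvFaltan] using hc), if_neg (by rw [hRk]; simpa using hc)]

theorem pv_init_index (S0 : PySem.Set String) (reglas : List (List String × String)) (c : String) :
    (pvInitB S0 reglas).1.getD c []
      = (List.range reglas.length).filter
          (fun j => decide (c ∈ pvFaltan S0 (reglas.getD j ([], "")))) := by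
  unfold pvInitB
  rw [(pv_init_fold S0 reglas reglas 0 PySem.Dict.empty [] (List.drop_zero (l := reglas)).symm).2 c,
      List.range_eq_range']
  simp [PySem.Dict.empty, PySem.Dict.getD, PySem.Dict.get?]

theorem pv_init_unmet (S0 : PySem.Set String) (reglas : List (List String × String)) :
    (pvInitB S0 reglas).2 = reglas.map (fun r => ((pvFaltan S0 r).length : Int)) := by
  unfold pvInitB
  rw [(pv_init_fold S0 reglas reglas 0 PySem.Dict.empty [] (List.drop_zero (l := reglas)).symm).1]
  simp

-- the two sweeps agree step for step and preserve the invariant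
theorem pv_pass_aux (I : PySem.Dict String (List Nat)) (S0 : PySem.Set String)
    (R : List (List String × String))
    (hI : ∀ c, I.getD c []
      = (List.range R.length).filter (fun j => decide (c ∈ pvFaltan S0 (R.getD j ([], "")))))
    (rs : List (List String × String)) :
    ∀ (k : Nat) (S : PySem.Set String) (unmet : List Int) (cb : Bool),
    rs = R.drop k →
    pvInv R S unmet →
    (∀ x ∈ S0, x ∈ S) →
    ((rs.foldl (fun (st : Nat × PySem.Set String × List Int × Bool) r =>
        if st.2.2.1.getD st.1 0 == 0 && !(PySem.Set.contains st.2.1 r.2) then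
          (st.1 + 1,
           PySem.Set.add st.2.1 r.2,
           (I.getD r.2 []).foldl (fun u j => u.set j (u.getD j 0 - 1)) st.2.2.1,
           true)
        else (st.1 + 1, st.2.1, st.2.2.1, st.2.2.2)) (k, S, unmet, cb)).2.1
      = (rs.foldl (fun (st : PySem.Set String × Bool) r =>
          if r.1.all (fun c => PySem.Set.contains st.1 c) then
            if PySem.Set.contains st.1 r.2 then st
            else (PySem.Set.add st.1 r.2, true)
          else st) (S, cb)).1) ∧
    ((rs.foldl (fun (st : Nat × PySem.Set String × List Int × Bool) r =>
        if st.2.2.1.getD st.1 0 == 0 && !(PySem.Set.contains st.2.1 r.2) then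
          (st.1 + 1,
           PySem.Set.add st.2.1 r.2,
           (I.getD r.2 []).foldl (fun u j => u.set j (u.getD j 0 - 1)) st.2.2.1,
           true)
        else (st.1 + 1, st.2.1, st.2.2.1, st.2.2.2)) (k, S, unmet, cb)).2.2.2
      = (rs.foldl (fun (st : PySem.Set String × Bool) r =>
          if r.1.all (fun c => PySem.Set.contains st.1 c) then
            if PySem.Set.contains st.1 r.2 then st
            else (PySem.Set.add st.1 r.2, true)
          else st) (S, cb)).2) ∧
    pvInv R (rs.foldl (fun (st : PySem.Set String × Bool) r =>
          if r.1.all (fun c => PySem.Set.contains st.1 c) then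
            if PySem.Set.contains st.1 r.2 then st
            else (PySem.Set.add st.1 r.2, true)
          else st) (S, cb)).1
      ((rs.foldl (fun (st : Nat × PySem.Set String × List Int × Bool) r =>
        if st.2.2.1.getD st.1 0 == 0 && !(PySem.Set.contains st.2.1 r.2) then
          (st.1 + 1,
           PySem.Set.add st.2.1 r.2,
           (I.getD r.2 []).foldl (fun u j => u.set j (u.getD j 0 - 1)) st.2.2.1,
           true)
        else (st.1 + 1, st.2.1, st.2.2.1, st.2.2.2)) (k, S, unmet, cb)).2.2.1) ∧
    (∀ x ∈ S0, x ∈ (rs.foldl (fun (st : PySem.Set String × Bool) r =>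
          if r.1.all (fun c => PySem.Set.contains st.1 c) then
            if PySem.Set.contains st.1 r.2 then st
            else (PySem.Set.add st.1 r.2, true)
          else st) (S, cb)).1) := by
  induction rs with
  | nil => intro k S unmet cb _ hInv hSub; exact ⟨rfl, rfl, hInv, hSub⟩
  | cons r rs ih =>
    intro k S unmet cb hdrop hInv hSub
    have hRk : R.getD k ([], "") = r := by
      rw [List.getD_eq_getElem?_getD]
      have : R[k]? = (R.drop k)[0]? := by simp
      rw [this, ← hdrop]; rfl
    have hk : k < R.length := by
      by_contra hk
      rw [List.drop_eq_nil_of_le (by omega)] at hdrop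
      exact List.cons_ne_nil r rs hdrop
    have hdrop' : rs = R.drop (k + 1) := by
      have : R.drop (k+1) = (R.drop k).drop 1 := by rw [List.drop_drop]
      rw [this, ← hdrop]; rfl
    have hcond : (unmet.getD k 0 == 0) = r.1.all (fun c => PySem.Set.contains S c) := by
      rw [hInv.2 k hk, hRk]
      by_cases hall : r.1.all (fun c => PySem.Set.contains S c) = true
      · rw [hall, (pv_cnt_eq_zero_iff S r.1).2 hall]
        rfl
      · simp only [Bool.not_eq_true] at hall
        rw [hall, beq_eq_false_iff_ne]
        have : pvCnt S r.1 ≠ 0 := fun h => by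
          rw [(pv_cnt_eq_zero_iff S r.1).1 h] at hall
          exact absurd hall (by simp)
        exact_mod_cast this
    rw [List.foldl_cons, List.foldl_cons]
    by_cases hall : r.1.all (fun c => PySem.Set.contains S c) = true
    · by_cases hcon : PySem.Set.contains S r.2 = true
      · -- conclusion already present: both skip
        simp only [hall, hcon, Bool.not_true, Bool.and_false, Bool.false_eq_true,
          if_false, if_true]
        exact ih (k+1) S unmet cb hdrop' hInv hSub
      · -- fire
        simp only [Bool.not_eq_true] at hcon
        simp only [hcond, hall, hcon, Bool.not_false, Bool.and_true, Bool.false_eq_true,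
          if_false, if_true]
        have hr2S : r.2 ∉ S := fun h => by
          simp [PySem.Set.contains, h] at hcon
        have hr2S0 : r.2 ∉ S0 := fun h => hr2S (hSub r.2 h)
        have hjs := hI r.2
        have hnd : (I.getD r.2 []).Nodup := by
          rw [hjs]; exact (List.nodup_range).filter _
        have hmemjs : ∀ i, i ∈ I.getD r.2 [] ↔
            (i < R.length ∧ r.2 ∈ (R.getD i ([], "")).1) := by
          intro i
          rw [hjs, List.mem_filter, List.mem_range]
          constructor
          · rintro ⟨h1, h2⟩
            refine ⟨h1, ?_⟩
            have := of_decide_eq_true h2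
            simp only [pvFaltan, PySem.List.mem_dedup, List.mem_filter] at this
            exact this.1
          · rintro ⟨h1, h2⟩
            refine ⟨h1, decide_eq_true ?_⟩
            simp only [pvFaltan, PySem.List.mem_dedup, List.mem_filter]
            exact ⟨h2, by simpa [PySem.Set.contains] using hr2S0⟩
        have hin : ∀ j ∈ I.getD r.2 [], j < unmet.length := by
          intro j hj; rw [hInv.1]; exact ((hmemjs j).1 hj).1
        have hdec := fun i => pv_dec_fold (I.getD r.2 []) hnd unmet hin i
        have hInv' : pvInv R (PySem.Set.add S r.2)
            ((I.getD r.2 []).foldl (fun u j => u.set j (u.getD j 0 - 1)) unmet) := by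
          constructor
          · rw [(hdec 0).2, hInv.1]
          · intro i hi
            rw [(hdec i).1, hInv.2 i hi,
                pv_cnt_add S (R.getD i ([], "")).1 r.2 hr2S]
            by_cases hm : r.2 ∈ (R.getD i ([], "")).1
            · rw [if_pos ((hmemjs i).2 ⟨hi, hm⟩), if_pos hm]
              have := pv_cnt_pos S (R.getD i ([], "")).1 r.2 hm hr2S
              omega
            · rw [if_neg (fun h => hm ((hmemjs i).1 h).2), if_neg hm]
              simp
        have hSub' : ∀ x ∈ S0, x ∈ PySem.Set.add S r.2 := by
          intro x hx
          exact (PySem.Set.mem_add S r.2 x).2 (Or.inl (hSub x hx))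
        exact ih (k+1) (PySem.Set.add S r.2) _ true hdrop' hInv' hSub'
    · -- conditions not all satisfied: both skip
      simp only [Bool.not_eq_true] at hall
      simp only [hcond, hall, Bool.false_and, Bool.false_eq_true, if_false]
      exact ih (k+1) S unmet cb hdrop' hInv hSub

-- the two sweeps agree and preserve the invariant
theorem pv_pass_equiv (hechos : List String) (reglas : List (List String × String))
    (S : PySem.Set String) (unmet : List Int)
    (hInv : pvInv reglas S unmet)
    (hSub : ∀ x ∈ PySem.Set.ofList hechos, x ∈ S) :
    (pvPassB (pvInitB (PySem.Set.ofList hechos) reglas).1 reglas S unmet).1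
        = (pvPassA reglas S).1 ∧
    (pvPassB (pvInitB (PySem.Set.ofList hechos) reglas).1 reglas S unmet).2.2
        = (pvPassA reglas S).2 ∧
    pvInv reglas (pvPassA reglas S).1
        (pvPassB (pvInitB (PySem.Set.ofList hechos) reglas).1 reglas S unmet).2.1 ∧
    (∀ x ∈ PySem.Set.ofList hechos, x ∈ (pvPassA reglas S).1) := by
  unfold pvPassA pvPassB
  exact pv_pass_aux (pvInitB (PySem.Set.ofList hechos) reglas).1 (PySem.Set.ofList hechos)
    reglas (pv_init_index (PySem.Set.ofList hechos) reglas) reglas 0 S unmet false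
    (List.drop_zero (l := reglas)).symm hInv hSub

theorem pv_loop_equiv (hechos : List String) (reglas : List (List String × String))
    (fuel : Nat) (S : PySem.Set String) (unmet : List Int)
    (hInv : pvInv reglas S unmet)
    (hSub : ∀ x ∈ PySem.Set.ofList hechos, x ∈ S) :
    pvLoopB reglas (pvInitB (PySem.Set.ofList hechos) reglas).1 fuel S unmet
      = pvLoopA reglas fuel S := by
  induction fuel generalizing S unmet with
  | zero => rfl
  | succ fuel ih =>
    obtain ⟨h1, h2, hInv', hSub'⟩ := pv_pass_equiv hechos reglas S unmet hInv hSub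
    show (let p := pvPassB (pvInitB (PySem.Set.ofList hechos) reglas).1 reglas S unmet
          if p.2.2 then pvLoopB reglas (pvInitB (PySem.Set.ofList hechos) reglas).1 fuel p.1 p.2.1
          else p.1)
        = (let p := pvPassA reglas S
           if p.2 then pvLoopA reglas fuel p.1 else p.1)
    simp only [h2, h1]
    by_cases hc : (pvPassA reglas S).2 = true
    · rw [if_pos hc, if_pos hc]
      exact ih (pvPassA reglas S).1 _ hInv' hSub'
    · simp only [Bool.not_eq_true] at hc
      rw [if_neg (by simp [hc]), if_neg (by simp [hc])]

-- ===== VERDICT (by name: the statement is the Claim_ definition above) =====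
theorem encadenamiento_hacia_adelante_spec : Claim_equal_encadenamiento_hacia_adelante := by
  intro hechos reglas _
  unfold Spec_encadenamiento_hacia_adelante
  unfold encadenamiento_hacia_adelante encadenamiento_hacia_adelante_alt
  refine (pv_loop_equiv hechos reglas _ _ _ ?_ (fun x hx => hx)).symm
  constructor
  · rw [pv_init_unmet]; simp
  · intro i hi
    rw [pv_init_unmet]
    rw [List.getD_eq_getElem?_getD, List.getElem?_map]
    have h : reglas[i]? = some (reglas.getD i ([], "")) := by
      simp [List.getD_eq_getElem?_getD, List.getElem?_eq_getElem hi]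
    rw [h]
    simp only [Option.map_some, Option.getD_some, pvFaltan, pvCnt]
    rw [pv_dedup_filter]
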